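-- pv_equiv track=rewrite | github.com/sandialabs/pypm | pypm/util/sim.py | organize_observations
-- ===== SOURCE A (Python) =====
-- def organize_observations(data, ntimes=0):
--     """
--     Organize the data observations into a dictionary indexed by
--     resource name.  For each resource, an array of length ntimes
--     contains 0/1 values indicating whether the resource was observed.
--     """
--     mini = 0
--     maxi = ntimes
--     activities = set()
--     for obs in data:
--         i, a = obs
--         activities.add(a)
--         if i + 1 > maxi:
--             maxi = i + 1
--     observations = {a: [0] * maxi for a in activities}
--     for obs in data:
--         i, a = obs
--         observations[a][i] = 1
--     return observations
-- ===== SOURCE B (Python) =====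
-- def organize_observations(data, ntimes=0):
--     """
--     Alternative decomposition: one grouping pass collects, per resource,
--     the set of observed time indices (and the horizon maxi); each 0/1
--     array is then built by a membership-test comprehension over range(maxi).
--     """
--     maxi = ntimes
--     idx = {}
--     for i, a in data:
--         idx.setdefault(a, set()).add(i)
--         if i + 1 > maxi:
--             maxi = i + 1
--     return {a: [1 if t in idx[a] else 0 for t in range(maxi)] for a in set(a for _, a in data)}
-- ===== Notes on version B (the rewrite author's own statement) =====
-- stated objective: alternative
-- what changed: Instead of zero-filling an array per resource and then directly assigning 1 at each observed index in a second pass over data, B makes one grouping pass that collects per resource the set of observed time indices (and the horizon maxi), and then builds each array by a membership-test comprehension over range(maxi).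
-- outside the precondition, e.g. on organize_observations([(-1, 'a')], 3): A returns {'a': [0, 0, 1]}, B returns {'a': [0, 0, 0]}
import Mathlib
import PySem

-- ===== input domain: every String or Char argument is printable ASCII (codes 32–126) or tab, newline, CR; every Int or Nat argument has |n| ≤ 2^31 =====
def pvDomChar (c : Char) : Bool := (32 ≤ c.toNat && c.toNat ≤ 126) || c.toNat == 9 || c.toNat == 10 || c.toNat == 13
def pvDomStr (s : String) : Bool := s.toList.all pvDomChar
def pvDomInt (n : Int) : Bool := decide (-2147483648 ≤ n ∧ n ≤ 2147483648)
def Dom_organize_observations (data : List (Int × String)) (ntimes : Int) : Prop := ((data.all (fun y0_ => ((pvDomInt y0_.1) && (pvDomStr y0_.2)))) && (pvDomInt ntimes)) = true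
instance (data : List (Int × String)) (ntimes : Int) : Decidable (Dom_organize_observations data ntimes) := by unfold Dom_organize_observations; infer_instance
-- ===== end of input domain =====

-- B replaces A's zero-fill-then-assign second pass by a grouping pass (per-resource set of observed
-- indices) followed by a membership-test comprehension per time cell; same cost, different decomposition.


-- ===== PORT A =====
def organize_observations (data : List (Int × String)) (ntimes : Int) : List (String × List Int) :=
  -- mini = 0 is dead state in A; maxi and activities are the loop's two accumulators
  let st := data.foldl
    (fun (st : Int × PySem.Set String) obs =>
      (if obs.1 + 1 > st.1 then obs.1 + 1 else st.1, PySem.Set.add st.2 obs.2))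
    (ntimes, PySem.Set.empty)
  let observations : PySem.Dict String (List Int) :=
    st.2.foldl (fun d a => d.insert a (List.replicate st.1.toNat 0)) PySem.Dict.empty
  -- observations[a][i] = 1 : pySetD is exact under Pre_ (0 ≤ i, and i < maxi by the first loop);
  -- for an index out of range Python raises IndexError — those inputs are outside Pre_
  let observations := data.foldl
    (fun d obs => d.modify obs.2 [] (fun xs => PySem.List.pySetD xs obs.1 1)) observations
  observations.items

-- ===== PORT B =====
def organize_observations_alt (data : List (Int × String)) (ntimes : Int) : List (String × List Int) :=
  -- idx.setdefault(a, set()).add(i)  ==  idx[a] = (idx.get(a, set())).add(i)  ==  Dict.modify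
  let st := data.foldl
    (fun (st : Int × PySem.Dict String (PySem.Set Int)) obs =>
      (if obs.1 + 1 > st.1 then obs.1 + 1 else st.1,
       st.2.modify obs.2 PySem.Set.empty (fun s => PySem.Set.add s obs.1)))
    (ntimes, PySem.Dict.empty)
  -- idx[a] : a is always a key of idx (it was grouped from data), so the getD default is never used
  (PySem.Set.ofList (data.map (fun obs => obs.2))).map (fun a =>
    (a, (PySem.List.pyRange 0 st.1 1).map
      (fun t => if PySem.Set.contains (st.2.getD a PySem.Set.empty) t then 1 else 0)))

-- ===== PRECONDITION & SPEC =====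
-- Pre_ restricts to the function's natural domain: nonnegative observation time indices. For a
-- negative index A raises IndexError when the index is below -maxi, and otherwise assigns through
-- Python's negative-index wraparound, which B's membership test over range(maxi) does not mark.
def Pre_organize_observations (data : List (Int × String)) (ntimes : Int) : Prop :=
  ∀ p ∈ data, 0 ≤ p.1
instance (data : List (Int × String)) (ntimes : Int) : Decidable (Pre_organize_observations data ntimes) := by unfold Pre_organize_observations; infer_instance
def pvWitness_organize_observations : (List (Int × String)) × Int :=
  ([(0, "a"), (2, "b"), (0, "b")], 2)

def Spec_organize_observations (data : List (Int × String)) (ntimes : Int) (out : List (String × List Int)) : Prop := out = organize_observations_alt data ntimes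
instance (data : List (Int × String)) (ntimes : Int) (out : List (String × List Int)) : Decidable (Spec_organize_observations data ntimes out) := by unfold Spec_organize_observations; infer_instance

-- ===== CLAIM (what is proved, stated in full; the proofs are below) =====
def Claim_equal_organize_observations : Prop := ∀ (data : List (Int × String)) (ntimes : Int), Dom_organize_observations data ntimes → Pre_organize_observations data ntimes → Spec_organize_observations data ntimes (organize_observations data ntimes)

-- ===== LEMMAS AND PROOFS =====

def pvMaxi (data : List (Int × String)) (ntimes : Int) : Int :=
  data.foldl (fun m p => if p.1 + 1 > m then p.1 + 1 else m) ntimes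

def pvStepA (d : PySem.Dict String (List Int)) (p : Int × String) : PySem.Dict String (List Int) :=
  d.modify p.2 [] (fun xs => PySem.List.pySetD xs p.1 1)

def pvStepB (d : PySem.Dict String (PySem.Set Int)) (p : Int × String) : PySem.Dict String (PySem.Set Int) :=
  d.modify p.2 PySem.Set.empty (fun s => PySem.Set.add s p.1)

lemma le_pvMaxi (data : List (Int × String)) (ntimes : Int) : ntimes ≤ pvMaxi data ntimes := by
  induction data generalizing ntimes with
  | nil => simp [pvMaxi]
  | cons p l ih =>
    have h := ih (if p.1 + 1 > ntimes then p.1 + 1 else ntimes)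
    simp only [pvMaxi, List.foldl_cons] at *
    refine le_trans ?_ h
    split <;> omega

lemma lt_pvMaxi (data : List (Int × String)) (ntimes : Int) (p : Int × String) (hp : p ∈ data) :
    p.1 + 1 ≤ pvMaxi data ntimes := by
  induction data generalizing ntimes with
  | nil => cases hp
  | cons q l ih =>
    rcases List.mem_cons.1 hp with h | h
    · subst h
      have h2 := le_pvMaxi l (if p.1 + 1 > ntimes then p.1 + 1 else ntimes)
      simp only [pvMaxi, List.foldl_cons] at *
      refine le_trans ?_ h2
      split <;> omega
    · exact ih _ h

lemma getD_foldl_insert_const {ν : Type} (l : List String) (v : ν) (d : PySem.Dict String ν)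
    (a : String) (dflt : ν) :
    (l.foldl (fun d x => d.insert x v) d).getD a dflt = if a ∈ l then v else d.getD a dflt := by
  induction l generalizing d with
  | nil => simp
  | cons x l ih =>
    simp only [List.foldl_cons, ih, List.mem_cons]
    by_cases hx : a = x
    · subst hx; simp [PySem.Dict.getD_insert_self]
    · by_cases hl : a ∈ l <;> simp [hx, hl, PySem.Dict.getD_insert_of_ne _ _ _ hx]

lemma foldl_add_of_subset {α : Type} [BEq α] [LawfulBEq α] (l : List α) (s : PySem.Set α)
    (h : ∀ x ∈ l, x ∈ s) : l.foldl PySem.Set.add s = s := by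
  induction l with
  | nil => rfl
  | cons x l ih =>
    have hx : PySem.Set.add s x = s := by
      simp [PySem.Set.add, PySem.Set.contains, h x (by simp)]
    simp only [List.foldl_cons, hx]
    exact ih (fun y hy => h y (by simp [hy]))

lemma rowA (data : List (Int × String)) (d : PySem.Dict String (List Int)) (a : String) (j : Nat)
    (hpre : ∀ p ∈ data, 0 ≤ p.1 ∧ p.1 < ((d.getD p.2 []).length : Int)) :
    ((data.foldl pvStepA d).getD a [])[j]? =
      if ∃ p ∈ data, p.2 = a ∧ p.1 = (j : Int) then some 1 else (d.getD a [])[j]? := by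
  induction data generalizing d with
  | nil => simp
  | cons p l ih =>
    have hp := hpre p (by simp)
    have hpre' : ∀ q ∈ l, 0 ≤ q.1 ∧ q.1 < (((pvStepA d p).getD q.2 []).length : Int) := by
      intro q hq
      have := hpre q (by simp [hq])
      have hl : (((pvStepA d p).getD q.2 []).length) = ((d.getD q.2 []).length) := by
        by_cases hqp : q.2 = p.2
        · rw [hqp]; simp [pvStepA, PySem.Dict.getD_modify_self, PySem.List.length_pySetD]
        · simp [pvStepA, PySem.Dict.getD_modify_of_ne _ _ _ hqp]
      rw [hl]; exact this
    simp only [List.foldl_cons, ih _ hpre']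
    by_cases hpa : p.2 = a
    · subst hpa
      have hrow : (pvStepA d p).getD p.2 [] = PySem.List.pySetD (d.getD p.2 []) p.1 1 := by
        simp [pvStepA, PySem.Dict.getD_modify_self]
      by_cases hex : ∃ q ∈ l, q.2 = p.2 ∧ q.1 = (j : Int)
      · simp [hex]
      · simp only [hex, if_false]
        by_cases hij : p.1 = (j : Int)
        · have hcond : ∃ q ∈ p :: l, q.2 = p.2 ∧ q.1 = (j : Int) := ⟨p, by simp [hij]⟩
          rw [if_pos hcond, hrow]
          rw [PySem.List.pySetD_of_nonneg _ _ hp.1]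
          have hjn : p.1.toNat = j := by omega
          have hjl : j < (d.getD p.2 []).length := by omega
          simp [hjn, hjl]
        · have hcond : ¬ ∃ q ∈ p :: l, q.2 = p.2 ∧ q.1 = (j : Int) := by
            rintro ⟨q, hq, h1, h2⟩
            rcases List.mem_cons.1 hq with rfl | hq'
            · exact hij h2
            · exact hex ⟨q, hq', h1, h2⟩
          rw [if_neg hcond, hrow]
          rw [PySem.List.pySetD_of_nonneg _ _ hp.1]
          have hne : j ≠ p.1.toNat := by omega
          simp [List.getElem?_set]
          intro h
          omega
    · have hrow : (pvStepA d p).getD a [] = d.getD a [] := by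
        have : a ≠ p.2 := fun h => hpa h.symm
        simp [pvStepA, PySem.Dict.getD_modify_of_ne _ _ _ this]
      rw [hrow]
      congr 1
      simp only [eq_iff_iff]
      constructor
      · rintro ⟨q, hq, h1, h2⟩; exact ⟨q, by simp [hq], h1, h2⟩
      · rintro ⟨q, hq, h1, h2⟩
        rcases List.mem_cons.1 hq with rfl | hq'
        · exact absurd h1 hpa
        · exact ⟨q, hq', h1, h2⟩

lemma memB (data : List (Int × String)) (d : PySem.Dict String (PySem.Set Int)) (a : String) (t : Int) :
    (t ∈ (data.foldl pvStepB d).getD a PySem.Set.empty) ↔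
      (t ∈ d.getD a PySem.Set.empty) ∨ ∃ p ∈ data, p.2 = a ∧ p.1 = t := by
  induction data generalizing d with
  | nil => simp
  | cons p l ih =>
    simp only [List.foldl_cons, ih]
    by_cases hpa : p.2 = a
    · subst hpa
      have : (pvStepB d p).getD p.2 PySem.Set.empty = PySem.Set.add (d.getD p.2 PySem.Set.empty) p.1 := by
        simp [pvStepB, PySem.Dict.getD_modify_self]
      rw [this, PySem.Set.mem_add]
      constructor
      · rintro ((h | h) | h)
        · exact Or.inl h
        · exact Or.inr ⟨p, by simp, rfl, h.symm⟩
        · rcases h with ⟨q, hq, h1, h2⟩; exact Or.inr ⟨q, by simp [hq], h1, h2⟩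
      · rintro (h | ⟨q, hq, h1, h2⟩)
        · exact Or.inl (Or.inl h)
        · rcases List.mem_cons.1 hq with rfl | hq'
          · exact Or.inl (Or.inr h2.symm)
          · exact Or.inr ⟨q, hq', h1, h2⟩
    · have hne : a ≠ p.2 := fun h => hpa h.symm
      have : (pvStepB d p).getD a PySem.Set.empty = d.getD a PySem.Set.empty := by
        simp [pvStepB, PySem.Dict.getD_modify_of_ne _ _ _ hne]
      rw [this]
      constructor
      · rintro (h | ⟨q, hq, h1, h2⟩)
        · exact Or.inl h
        · exact Or.inr ⟨q, by simp [hq], h1, h2⟩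
      · rintro (h | ⟨q, hq, h1, h2⟩)
        · exact Or.inl h
        · rcases List.mem_cons.1 hq with rfl | hq'
          · exact absurd h1 hpa
          · exact Or.inr ⟨q, hq', h1, h2⟩

def pvK (data : List (Int × String)) : PySem.Set String :=
  data.foldl (fun s p => PySem.Set.add s p.2) PySem.Set.empty

def pvD0 (data : List (Int × String)) (ntimes : Int) : PySem.Dict String (List Int) :=
  (pvK data).foldl (fun d a => d.insert a (List.replicate (pvMaxi data ntimes).toNat 0)) PySem.Dict.empty

lemma pvK_eq (data : List (Int × String)) : pvK data = PySem.Set.ofList (data.map (fun (p : Int × String) => p.2)) := by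
  rw [PySem.Set.ofList_eq_foldl, List.foldl_map]
  rfl

lemma nodup_pvK (data : List (Int × String)) : (pvK data).Nodup := by
  rw [pvK_eq]; exact PySem.Set.nodup_ofList _

lemma foldl_add_fresh {α : Type} [BEq α] [LawfulBEq α] (l : List α) (s : PySem.Set α)
    (hd : ∀ x ∈ l, x ∉ s) (hl : l.Nodup) : l.foldl PySem.Set.add s = s ++ l := by
  induction l generalizing s with
  | nil => simp
  | cons x l ih =>
    have hx : PySem.Set.add s x = s ++ [x] := by
      simp [PySem.Set.add, PySem.Set.contains, hd x (by simp)]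
    simp only [List.foldl_cons, hx]
    rw [ih (s ++ [x])]
    · simp
    · intro y hy
      simp only [List.mem_append, List.mem_singleton]
      rintro (h | rfl)
      · exact hd y (by simp [hy]) h
      · exact (List.nodup_cons.1 hl).1 hy
    · exact (List.nodup_cons.1 hl).2

lemma update_of_subset {α : Type} [BEq α] [LawfulBEq α] (s : PySem.Set α) (l : List α)
    (h : ∀ x ∈ l, x ∈ s) : PySem.Set.update s l = s := by
  have : PySem.Set.update s l = l.foldl PySem.Set.add s := rfl
  rw [this]; exact foldl_add_of_subset l s h

lemma update_nil_eq {α : Type} [BEq α] (l : List α) :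
    PySem.Set.update ([] : PySem.Set α) l = PySem.Set.ofList l := by
  rw [PySem.Set.ofList_eq_foldl]; rfl

lemma keys_pvD0 (data : List (Int × String)) (ntimes : Int) : (pvD0 data ntimes).keys = pvK data := by
  unfold pvD0
  rw [PySem.Dict.keys_foldl_insert (pvK data) (fun _ _ => List.replicate (pvMaxi data ntimes).toNat 0)]
  have : (PySem.Dict.empty : PySem.Dict String (List Int)).keys = [] := rfl
  rw [this, update_nil_eq, PySem.Set.ofList_eq_foldl,
    foldl_add_fresh _ [] (by simp) (nodup_pvK data)]
  simp

lemma keysA_final (data : List (Int × String)) (ntimes : Int) :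
    (data.foldl pvStepA (pvD0 data ntimes)).keys = pvK data := by
  have hs : pvStepA = fun d p => d.modify p.2 [] (fun xs => PySem.List.pySetD xs p.1 1) := rfl
  rw [hs, PySem.Dict.keys_foldl_modify_key data (fun (p : Int × String) => p.2) [] (fun _ p xs => PySem.List.pySetD xs p.1 1)]
  rw [keys_pvD0]
  exact update_of_subset _ _ (by
    intro x hx
    rw [pvK_eq, PySem.Set.mem_ofList]
    exact hx)

lemma getD_pvD0 (data : List (Int × String)) (ntimes : Int) (a : String) (ha : a ∈ pvK data) :
    (pvD0 data ntimes).getD a [] = List.replicate (pvMaxi data ntimes).toNat 0 := by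
  unfold pvD0
  rw [getD_foldl_insert_const]
  simp [ha]

lemma row_eq (data : List (Int × String)) (ntimes : Int) (hpre : ∀ p ∈ data, 0 ≤ p.1)
    (a : String) (ha : a ∈ pvK data) :
    (data.foldl pvStepA (pvD0 data ntimes)).getD a [] =
      (PySem.List.pyRange 0 (pvMaxi data ntimes) 1).map
        (fun t => if PySem.Set.contains ((data.foldl pvStepB PySem.Dict.empty).getD a PySem.Set.empty) t then 1 else 0) := by
  have hM : ∀ p ∈ data, 0 ≤ p.1 ∧ p.1 < ((pvMaxi data ntimes).toNat : Int) := by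
    intro p hp
    have h1 := hpre p hp
    have h2 := lt_pvMaxi data ntimes p hp
    have h3 : 0 ≤ pvMaxi data ntimes := by omega
    rw [Int.toNat_of_nonneg h3]
    exact ⟨h1, by omega⟩
  have hD0 : ∀ p ∈ data, 0 ≤ p.1 ∧ p.1 < (((pvD0 data ntimes).getD p.2 []).length : Int) := by
    intro p hp
    have hmem : p.2 ∈ pvK data := by
      rw [pvK_eq, PySem.Set.mem_ofList]
      exact List.mem_map_of_mem hp
    rw [getD_pvD0 data ntimes p.2 hmem, List.length_replicate]
    exact hM p hp
  apply List.ext_getElem?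
  intro j
  rw [rowA data _ a j hD0]
  rw [List.getElem?_map, PySem.List.getElem?_pyRange_one]
  by_cases hex : ∃ p ∈ data, p.2 = a ∧ p.1 = (j : Int)
  · rw [if_pos hex]
    obtain ⟨p, hp, hpa, hpj⟩ := hex
    have hj : j < (pvMaxi data ntimes).toNat := by
      have := (hM p hp).2
      omega
    rw [if_pos (by omega : j < (pvMaxi data ntimes - 0).toNat)]
    have hm : (j:Int) ∈ (data.foldl pvStepB PySem.Dict.empty).getD a PySem.Set.empty := by
      rw [memB]
      exact Or.inr ⟨p, hp, hpa, hpj⟩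
    simp only [PySem.Set.empty] at hm
    simp [PySem.Set.contains, hm]
  · rw [if_neg hex, getD_pvD0 data ntimes a ha, List.getElem?_replicate]
    by_cases hj : j < (pvMaxi data ntimes).toNat
    · rw [if_pos hj, if_pos (by omega : j < (pvMaxi data ntimes - 0).toNat)]
      have hnm : ¬ ((j:Int) ∈ (data.foldl pvStepB PySem.Dict.empty).getD a PySem.Set.empty) := by
        rw [memB]
        have he : (PySem.Dict.empty : PySem.Dict String (PySem.Set Int)).getD a PySem.Set.empty = [] := rfl
        rw [he]
        rintro (h | ⟨p, hp, hpa, hpj⟩)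
        · simp at h
        · exact hex ⟨p, hp, hpa, hpj⟩
      simp only [PySem.Set.empty] at hnm
      simp [PySem.Set.contains, hnm]
    · rw [if_neg hj, if_neg (by omega : ¬ j < (pvMaxi data ntimes - 0).toNat)]
      simp

lemma A_eq (data : List (Int × String)) (ntimes : Int) :
    organize_observations data ntimes = (data.foldl pvStepA (pvD0 data ntimes)).items := by
  unfold organize_observations
  rw [PySem.List.foldl_prod_mk
    (f := fun m (obs : Int × String) => if obs.1 + 1 > m then obs.1 + 1 else m)
    (g := fun s (obs : Int × String) => PySem.Set.add s obs.2)]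
  rfl

lemma B_eq (data : List (Int × String)) (ntimes : Int) :
    organize_observations_alt data ntimes =
      (PySem.Set.ofList (data.map (fun (p : Int × String) => p.2))).map (fun a =>
        (a, (PySem.List.pyRange 0 (pvMaxi data ntimes) 1).map
          (fun t => if PySem.Set.contains ((data.foldl pvStepB PySem.Dict.empty).getD a PySem.Set.empty) t then 1 else 0))) := by
  unfold organize_observations_alt
  rw [PySem.List.foldl_prod_mk
    (f := fun m (obs : Int × String) => if obs.1 + 1 > m then obs.1 + 1 else m)
    (g := fun d (obs : Int × String) => PySem.Dict.modify d obs.2 PySem.Set.empty (fun s => PySem.Set.add s obs.1))]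
  rfl

lemma pvMain (data : List (Int × String)) (ntimes : Int) (hpre : ∀ p ∈ data, 0 ≤ p.1) :
    organize_observations data ntimes = organize_observations_alt data ntimes := by
  rw [A_eq, B_eq, ← pvK_eq]
  have hkA := keysA_final data ntimes
  have hndA : (data.foldl pvStepA (pvD0 data ntimes)).keys.Nodup := by
    rw [hkA]; exact nodup_pvK data
  rw [PySem.Dict.items_eq_map_keys _ hndA [], hkA]
  apply List.map_congr_left
  intro a ha
  rw [row_eq data ntimes hpre a ha]

-- ===== VERDICT (by name: the statement is the Claim_ definition above) =====
theorem organize_observations_spec : Claim_equal_organize_observations := by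
  intro data ntimes _ hpre
  unfold Spec_organize_observations
  exact pvMain data ntimes hpre
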